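-- pv_equiv track=rewrite | github.com/chewie2000/sigma_sandpit | python/databricks/populate_sigds_workbook_map.py | build_id_index
-- ===== SOURCE A (Python) =====
-- def build_id_index(entries: list, target_ids: set) -> dict:
--     """
--     Index a list of Sigma API objects by the ID field that best overlaps
--     with target_ids.  Inspects every key containing 'id' in the first entry
--     and picks the one with the highest match count against target_ids.  This
--     avoids hard-coding field names that differ between API versions.
--     Returns {normalised_id_string: entry_dict}.
--     """
--     if not entries or not target_ids:
--         return {}
--     target_norm = {v.strip().lower() for v in target_ids}
--     candidates  = [k for k in entries[0] if "id" in k.lower()] or ["id"]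
--     best_key    = max(
--         candidates,
--         key=lambda k: len(
--             {e[k].strip().lower() for e in entries if e.get(k)} & target_norm
--         ),
--     )
--     return {
--         e[best_key].strip().lower(): e
--         for e in entries if e.get(best_key)
--     }
-- ===== SOURCE B (Python) =====
-- def build_id_index(entries: list, target_ids: set) -> dict:
--     """Reverse-index algorithm: one pass over the entries' items builds a map
--     from each normalised value to the set of candidate keys producing it; each
--     candidate's score is then accumulated by looking every normalised target
--     up in that map (no per-key value sets, no set intersections); a running
--     comparison picks the best key and an explicit loop builds the index."""
--     if not entries or not target_ids:
--         return {}
--     target_norm = {v.strip().lower() for v in target_ids}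
--     candidates = [k for k in entries[0] if "id" in k.lower()] or ["id"]
--     cset = set(candidates)
--     rev = {}
--     for e in entries:
--         for k, v in e.items():
--             if k in cset and v:
--                 rev.setdefault(v.strip().lower(), set()).add(k)
--     score = {}
--     for t in target_norm:
--         for k in rev.get(t, ()):
--             score[k] = score.get(k, 0) + 1
--     best_key = candidates[0]
--     for k in candidates[1:]:
--         if score.get(k, 0) > score.get(best_key, 0):
--             best_key = k
--     index = {}
--     for e in entries:
--         v = e.get(best_key)
--         if v:
--             index[v.strip().lower()] = e
--     return index
-- ===== Notes on version B (the rewrite author's own statement) =====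
-- stated objective: alternative
-- what changed: A builds a set of normalised entry values per candidate key and takes the length of its intersection with the target set inside max's key; B inverts the data flow: one pass over the entries' items builds a reverse index from each normalised value to the set of candidate keys producing it, candidate scores are accumulated by looking every normalised target up in that index (no per-key value sets, no set intersections), a running comparison picks the best key and an explicit loop builds the final index.
import Mathlib
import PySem

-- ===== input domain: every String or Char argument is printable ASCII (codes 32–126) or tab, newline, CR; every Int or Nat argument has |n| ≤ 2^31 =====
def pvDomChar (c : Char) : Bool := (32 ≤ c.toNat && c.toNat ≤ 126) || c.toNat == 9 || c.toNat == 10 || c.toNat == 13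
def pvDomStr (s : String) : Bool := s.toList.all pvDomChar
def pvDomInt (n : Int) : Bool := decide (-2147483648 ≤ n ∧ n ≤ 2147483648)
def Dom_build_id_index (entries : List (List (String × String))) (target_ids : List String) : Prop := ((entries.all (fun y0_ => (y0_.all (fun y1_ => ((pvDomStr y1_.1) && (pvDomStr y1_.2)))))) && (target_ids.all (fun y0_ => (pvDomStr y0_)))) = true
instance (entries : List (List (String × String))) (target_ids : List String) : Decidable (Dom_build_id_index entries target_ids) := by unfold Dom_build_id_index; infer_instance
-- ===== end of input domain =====

-- B replaces A's per-candidate value sets and set intersections with a reverse index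
-- (normalised value -> set of candidate keys) built in one pass over the entries' items,
-- scoring each candidate by looking every normalised target up in that index
-- (alternative decomposition, similar cost).

-- v.strip().lower() — shared normalisation, used by both sources
def pvNorm (s : String) : String := PySem.Str.lower (PySem.Str.strip s)

-- e.get(k) together with Python truthiness of the value: some v iff e.get(k) is a non-empty string
def pvGetT (e : List (String × String)) (k : String) : Option String :=
  match (PySem.Dict.mk e).get? k with
  | some v => if v = "" then none else some v
  | none => none

-- ===== PORT A =====
def build_id_index (entries : List (List (String × String))) (target_ids : List String) : List (String × List (String × String)) :=
  if entries = [] ∨ target_ids = [] then []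
  else
    let target_norm : PySem.Set String := PySem.Set.ofList (target_ids.map pvNorm)
    let cand0 : List String := ((entries.headD []).map (fun p => p.1)).filter (fun k => PySem.Str.isIn "id" (PySem.Str.lower k))
    let candidates : List String := if cand0 = [] then ["id"] else cand0
    -- max(candidates, key=λk. len({e[k].strip().lower() for e in entries if e.get(k)} & target_norm))
    match PySem.List.max? candidates (fun k =>
        PySem.Set.len (PySem.Set.inter
          (entries.foldl (fun s e =>
            match pvGetT e k with
            | some v => s.add (pvNorm v)
            | none => s) PySem.Set.empty)
          target_norm)) with
    | some best_key =>
        (entries.foldl (fun d e =>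
          match pvGetT e best_key with
          | some v => d.insert (pvNorm v) e
          | none => d) PySem.Dict.empty).items
    | none => []   -- unreachable: candidates is never empty

-- ===== PORT B =====
-- e.items(): one (key, value) pair per key; a dict holds each key once, so the pair list is
-- deduplicated by key, keeping the first pair — consistent with PySem.Dict.get? (first match)
def pvItems : List (String × String) → List (String × String)
  | [] => []
  | (k, v) :: rest => (k, v) :: (pvItems rest).filter (fun p => !(p.1 == k))

def build_id_index_alt (entries : List (List (String × String))) (target_ids : List String) : List (String × List (String × String)) :=
  if entries = [] ∨ target_ids = [] then []
  else
    let target_norm : PySem.Set String := PySem.Set.ofList (target_ids.map pvNorm)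
    let cand0 : List String := ((entries.headD []).map (fun p => p.1)).filter (fun k => PySem.Str.isIn "id" (PySem.Str.lower k))
    let candidates : List String := if cand0 = [] then ["id"] else cand0
    let cset : PySem.Set String := PySem.Set.ofList candidates
    -- rev: normalised value -> set of candidate keys producing it, one pass over all items
    let rev : PySem.Dict String (PySem.Set String) :=
      entries.foldl (fun r e =>
        (pvItems e).foldl (fun r kv =>
          if cset.contains kv.1 && !(kv.2 == "") then
            r.modify (pvNorm kv.2) PySem.Set.empty (fun s => s.add kv.1)
          else r) r) PySem.Dict.empty
    -- score[k] += 1 for every target t whose reverse-index bucket contains k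
    let score : PySem.Dict String Int :=
      target_norm.foldl (fun sc t =>
        (rev.getD t PySem.Set.empty).foldl (fun sc k => sc.insert k (sc.getD k 0 + 1)) sc) PySem.Dict.empty
    -- running comparison over the candidates, first on ties
    let best_key : String :=
      candidates.tail.foldl (fun b k => if score.getD k 0 > score.getD b 0 then k else b) (candidates.headD "id")
    -- explicit index-building loop (last wins, first-insertion position)
    (entries.foldl (fun d e =>
      match pvGetT e best_key with
      | some v => d.insert (pvNorm v) e
      | none => d) PySem.Dict.empty).items

-- ===== PRECONDITION & SPEC =====
def Spec_build_id_index (entries : List (List (String × String))) (target_ids : List String) (out : List (String × List (String × String))) : Prop := out = build_id_index_alt entries target_ids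
instance (entries : List (List (String × String))) (target_ids : List String) (out : List (String × List (String × String))) : Decidable (Spec_build_id_index entries target_ids out) := by unfold Spec_build_id_index; infer_instance

-- ===== CLAIM (what is proved, stated in full; the proofs are below) =====
def Claim_equal_build_id_index : Prop := ∀ (entries : List (List (String × String))) (target_ids : List String), Dom_build_id_index entries target_ids → Spec_build_id_index entries target_ids (build_id_index entries target_ids)

-- ===== LEMMAS AND PROOFS =====

-- the normalised value of e at k, none when e.get(k) is falsy (used only in proofs)
def pvNormAt (e : List (String × String)) (k : String) : Option String :=
  match pvGetT e k with
  | some v => some (pvNorm v)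
  | none => none

-- A's per-key value-set accumulator
def pvSeenA (entries : List (List (String × String))) (k : String) (s : PySem.Set String) : PySem.Set String :=
  entries.foldl (fun s e =>
    match pvGetT e k with
    | some v => s.add (pvNorm v)
    | none => s) s

theorem pvStepA_eq (k : String) (s : PySem.Set String) (e : List (String × String)) :
    (match pvGetT e k with
     | some v => s.add (pvNorm v)
     | none => s) = PySem.Set.update s ((pvNormAt e k).toList) := by
  unfold pvNormAt
  cases h : pvGetT e k <;> simp [PySem.Set.update_cons, PySem.Set.update_nil]

theorem pvSeenA_eq_update (entries : List (List (String × String))) (k : String) (s : PySem.Set String) :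
    pvSeenA entries k s = PySem.Set.update s (entries.flatMap (fun e => (pvNormAt e k).toList)) := by
  induction entries generalizing s with
  | nil => simp [pvSeenA, PySem.Set.update_nil]
  | cons e es ih =>
      unfold pvSeenA
      rw [List.foldl_cons, pvStepA_eq]
      rw [show List.foldl _ (PySem.Set.update s (pvNormAt e k).toList) es = pvSeenA es k (PySem.Set.update s (pvNormAt e k).toList) from rfl]
      rw [ih, List.flatMap_cons, PySem.Set.update_append]

theorem pvMem_seenA (entries : List (List (String × String))) (k : String) (t : String) :
    t ∈ pvSeenA entries k PySem.Set.empty ↔ ∃ e ∈ entries, pvNormAt e k = some t := by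
  rw [pvSeenA_eq_update, PySem.Set.mem_update]
  simp [PySem.Set.empty, List.mem_flatMap]

theorem pvSeenA_nodup (entries : List (List (String × String))) (k : String) :
    (pvSeenA entries k PySem.Set.empty).Nodup := by
  rw [pvSeenA_eq_update]
  exact PySem.Set.nodup_update _ _ List.nodup_nil

-- pvItems agrees with first-match lookup
theorem pvItems_mem (e : List (String × String)) (k v : String) :
    (k, v) ∈ pvItems e ↔ (PySem.Dict.mk e).get? k = some v := by
  induction e with
  | nil => simp [pvItems, PySem.Dict.get?]
  | cons p rest ih =>
      obtain ⟨k', v'⟩ := p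
      rw [PySem.Dict.get?_mk_cons]
      simp only [pvItems, List.mem_cons, List.mem_filter]
      by_cases hk : k' = k
      · subst hk
        simp only [beq_self_eq_true, if_true, Bool.not_eq_eq_eq_not, Bool.not_true, beq_eq_false_iff_ne,
          ne_eq, Prod.mk.injEq, Option.some.injEq]
        simp [eq_comm]

      · have hbeq : (k' == k) = false := by simp [hk]
        rw [hbeq]
        simp only [Bool.false_eq_true, if_false, ← ih, Prod.mk.injEq]
        simp only [beq_iff_eq, Bool.not_eq_true']
        constructor
        · rintro (⟨rfl, _⟩ | ⟨h, _⟩)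
          · exact absurd rfl hk
          · exact h
        · intro h
          exact Or.inr ⟨h, by simp [Ne.symm hk]⟩

-- ===== the reverse index: membership characterisation and nodup buckets =====

-- one entry's inner fold, projected at one normalised value t
theorem pvRevInner_mem (cset : PySem.Set String) (items : List (String × String))
    (r : PySem.Dict String (PySem.Set String)) (t y : String) :
    y ∈ ((items.foldl (fun r kv =>
        if cset.contains kv.1 && !(kv.2 == "") then
          r.modify (pvNorm kv.2) PySem.Set.empty (fun s => s.add kv.1)
        else r) r).getD t PySem.Set.empty)
      ↔ y ∈ r.getD t PySem.Set.empty ∨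
        ∃ kv ∈ items, (cset.contains kv.1 && !(kv.2 == "")) = true ∧ pvNorm kv.2 = t ∧ kv.1 = y := by
  induction items generalizing r with
  | nil => simp
  | cons kv rest ih =>
      rw [List.foldl_cons]
      simp only [List.mem_cons]
      by_cases hc : (cset.contains kv.1 && !(kv.2 == "")) = true
      · rw [if_pos hc, ih]
        rw [PySem.Dict.getD_modify]
        by_cases ht : t = pvNorm kv.2
        · rw [if_pos ht, PySem.Set.mem_add]
          constructor
          · rintro ((h | rfl) | ⟨kv', hmem, h1, h2, h3⟩)
            · exact Or.inl (ht ▸ h)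
            · exact Or.inr ⟨kv, Or.inl rfl, hc, ht.symm, rfl⟩
            · exact Or.inr ⟨kv', Or.inr hmem, h1, h2, h3⟩
          · rintro (h | ⟨kv', (rfl | hmem), h1, h2, h3⟩)
            · exact Or.inl (Or.inl (ht ▸ h))
            · exact Or.inl (Or.inr h3.symm)
            · exact Or.inr ⟨kv', hmem, h1, h2, h3⟩
        · rw [if_neg ht]
          constructor
          · rintro (h | ⟨kv', hmem, h1, h2, h3⟩)
            · exact Or.inl h
            · exact Or.inr ⟨kv', Or.inr hmem, h1, h2, h3⟩
          · rintro (h | ⟨kv', (rfl | hmem), h1, h2, h3⟩)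
            · exact Or.inl h
            · exact absurd h2.symm ht
            · exact Or.inr ⟨kv', hmem, h1, h2, h3⟩
      · rw [if_neg hc, ih]
        constructor
        · rintro (h | ⟨kv', hmem, h1, h2, h3⟩)
          · exact Or.inl h
          · exact Or.inr ⟨kv', Or.inr hmem, h1, h2, h3⟩
        · rintro (h | ⟨kv', (rfl | hmem), h1, h2, h3⟩)
          · exact Or.inl h
          · exact absurd h1 hc
          · exact Or.inr ⟨kv', hmem, h1, h2, h3⟩

-- the whole reverse index, projected at one normalised value t
theorem pvRev_mem (cset : PySem.Set String) (entries : List (List (String × String)))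
    (r : PySem.Dict String (PySem.Set String)) (t y : String) :
    y ∈ ((entries.foldl (fun r e =>
        (pvItems e).foldl (fun r kv =>
          if cset.contains kv.1 && !(kv.2 == "") then
            r.modify (pvNorm kv.2) PySem.Set.empty (fun s => s.add kv.1)
          else r) r) r).getD t PySem.Set.empty)
      ↔ y ∈ r.getD t PySem.Set.empty ∨
        ∃ e ∈ entries, ∃ kv ∈ pvItems e, (cset.contains kv.1 && !(kv.2 == "")) = true ∧ pvNorm kv.2 = t ∧ kv.1 = y := by
  induction entries generalizing r with
  | nil => simp
  | cons e es ih =>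
      rw [List.foldl_cons, ih, pvRevInner_mem]
      simp only [List.mem_cons]
      constructor
      · rintro ((h | ⟨kv, hkv, h1, h2, h3⟩) | ⟨e', he', hrest⟩)
        · exact Or.inl h
        · exact Or.inr ⟨e, Or.inl rfl, kv, hkv, h1, h2, h3⟩
        · exact Or.inr ⟨e', Or.inr he', hrest⟩
      · rintro (h | ⟨e', (rfl | he'), hrest⟩)
        · exact Or.inl (Or.inl h)
        · exact Or.inl (Or.inr hrest)
        · exact Or.inr ⟨e', he', hrest⟩

-- every bucket of the reverse index is duplicate-free
theorem pvRevInner_nodup (cset : PySem.Set String) (items : List (String × String))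
    (r : PySem.Dict String (PySem.Set String)) (h : ∀ t, (r.getD t PySem.Set.empty).Nodup) :
    ∀ t, (((items.foldl (fun r kv =>
        if cset.contains kv.1 && !(kv.2 == "") then
          r.modify (pvNorm kv.2) PySem.Set.empty (fun s => s.add kv.1)
        else r) r)).getD t PySem.Set.empty).Nodup := by
  induction items generalizing r with
  | nil => exact h
  | cons kv rest ih =>
      rw [List.foldl_cons]
      by_cases hc : (cset.contains kv.1 && !(kv.2 == "")) = true
      · rw [if_pos hc]
        refine ih _ ?_
        intro t
        rw [PySem.Dict.getD_modify]
        split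
        · exact PySem.Set.nodup_add _ _ (h _)
        · exact h t
      · rw [if_neg hc]
        exact ih r h

theorem pvRev_nodup (cset : PySem.Set String) (entries : List (List (String × String)))
    (r : PySem.Dict String (PySem.Set String)) (h : ∀ t, (r.getD t PySem.Set.empty).Nodup) :
    ∀ t, (((entries.foldl (fun r e =>
        (pvItems e).foldl (fun r kv =>
          if cset.contains kv.1 && !(kv.2 == "") then
            r.modify (pvNorm kv.2) PySem.Set.empty (fun s => s.add kv.1)
          else r) r) r)).getD t PySem.Set.empty).Nodup := by
  induction entries generalizing r with
  | nil => exact h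
  | cons e es ih =>
      rw [List.foldl_cons]
      exact ih _ (pvRevInner_nodup cset (pvItems e) r h)

-- bucket membership at a candidate key = membership of the target in A's value set
theorem pvRev_mem_iff_seenA (cset : PySem.Set String) (entries : List (List (String × String)))
    (t k : String) (hk : cset.contains k = true) :
    k ∈ ((entries.foldl (fun r e =>
        (pvItems e).foldl (fun r kv =>
          if cset.contains kv.1 && !(kv.2 == "") then
            r.modify (pvNorm kv.2) PySem.Set.empty (fun s => s.add kv.1)
          else r) r) PySem.Dict.empty).getD t PySem.Set.empty)
      ↔ t ∈ pvSeenA entries k PySem.Set.empty := by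
  rw [pvRev_mem, pvMem_seenA]
  simp only [PySem.Dict.getD_empty, PySem.Set.empty, List.not_mem_nil, false_or]
  constructor
  · rintro ⟨e, he, ⟨k', v⟩, hkv, h1, h2, rfl⟩
    refine ⟨e, he, ?_⟩
    have hg := (pvItems_mem e k' v).mp hkv
    have hv : ¬ v = "" := by
      simp only [Bool.and_eq_true, Bool.not_eq_true', beq_eq_false_iff_ne, ne_eq] at h1
      exact h1.2
    simp only [pvNormAt, pvGetT, hg, if_neg hv, h2]
  · rintro ⟨e, he, hn⟩
    simp only [pvNormAt, pvGetT] at hn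
    rcases hg : (PySem.Dict.mk e).get? k with _ | v
    · simp [hg] at hn
    · by_cases hv : v = ""
      · simp [hg, hv] at hn
      · simp only [hg, if_neg hv, Option.some.injEq] at hn
        refine ⟨e, he, (k, v), (pvItems_mem e k v).mpr hg, ?_, ?_, rfl⟩
        · simp only [Bool.and_eq_true, Bool.not_eq_true', beq_eq_false_iff_ne, ne_eq]
          exact ⟨hk, hv⟩
        · exact hn

-- general counting fact: common elements of two duplicate-free lists, counted from either side
theorem pvFilter_mem_comm {α : Type} [DecidableEq α] (a b : List α)
    (ha : a.Nodup) (hb : b.Nodup) :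
    (a.filter (fun x => decide (x ∈ b))).length = (b.filter (fun x => decide (x ∈ a))).length := by
  have h1 : (a.filter (fun x => decide (x ∈ b))).length = (a.toFinset ∩ b.toFinset).card := by
    rw [← List.toFinset_card_of_nodup (ha.filter _), List.toFinset_filter, ← Finset.filter_mem_eq_inter]
    congr 1
    simp
  have h2 : (b.filter (fun x => decide (x ∈ a))).length = (b.toFinset ∩ a.toFinset).card := by
    rw [← List.toFinset_card_of_nodup (hb.filter _), List.toFinset_filter, ← Finset.filter_mem_eq_inter]
    congr 1
    simp
  rw [h1, h2, Finset.inter_comm]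

-- A's key function as a count over the (duplicate-free) normalised targets
theorem pvKeyA_eq_countP (S T : PySem.Set String) (hS : S.Nodup) (hT : T.Nodup) :
    PySem.Set.len (PySem.Set.inter S T) = ((T.countP (fun t => decide (t ∈ S))) : Int) := by
  have h2 : S.filter (fun x => T.contains x) = S.filter (fun x => decide (x ∈ T)) := by
    apply List.filter_congr
    intro x _
    simp [PySem.Set.contains_eq_listContains]
  simp only [PySem.Set.len, PySem.Set.inter, List.countP_eq_length_filter]
  rw [h2, pvFilter_mem_comm S T hS hT]

-- the score dict counts, for each key, the targets whose bucket contains it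
theorem pvScore_getD (rev : PySem.Dict String (PySem.Set String)) (T : List String)
    (sc : PySem.Dict String Int) (k : String)
    (hnd : ∀ t, (rev.getD t PySem.Set.empty).Nodup) :
    ((T.foldl (fun sc t =>
        (rev.getD t PySem.Set.empty).foldl (fun sc k => sc.insert k (sc.getD k 0 + 1)) sc) sc).getD k 0)
      = sc.getD k 0 + ((T.countP (fun t => decide (k ∈ rev.getD t PySem.Set.empty))) : Int) := by
  induction T generalizing sc with
  | nil => simp
  | cons t ts ih =>
      rw [List.foldl_cons, ih, List.countP_cons]
      rw [PySem.Dict.getD_foldl_insert_add_one]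
      by_cases hm : k ∈ rev.getD t PySem.Set.empty
      · rw [List.count_eq_one_of_mem (hnd t) hm]
        simp only [hm, decide_true]
        push_cast
        ring
      · rw [List.count_eq_zero_of_not_mem hm]
        simp only [hm, decide_false]
        push_cast
        ring

-- first-maximal element of a list as a running fold (first wins on ties)
def pvRunMax (key : String → Int) (cs : List String) (m : String) : String :=
  cs.foldl (fun q k => if key q < key k then k else q) m

theorem pvMax?_eq_runMax (key : String → Int) (cs : List String) (m : String) :
    PySem.List.max? (m :: cs) key = some (pvRunMax key cs m) := by
  show List.foldl _ none (m :: cs) = _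
  rw [List.foldl_cons]
  show List.foldl _ (some m) cs = _
  unfold pvRunMax
  induction cs generalizing m with
  | nil => rfl
  | cons c cs ih =>
      rw [List.foldl_cons, List.foldl_cons]
      by_cases h : key m < key c <;> simp [h, ih]

-- B's selection fold, with score lookups replaced by any function agreeing on members
theorem pvBSel_eq_runMax (score key : String → Int) (full : List String)
    (hag : ∀ x ∈ full, score x = key x) :
    ∀ (cs : List String), (∀ x ∈ cs, x ∈ full) → ∀ m ∈ full,
      cs.foldl (fun b k => if score k > score b then k else b) m = pvRunMax key cs m := by
  intro cs
  induction cs with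
  | nil =>
      intro _ m _
      rfl
  | cons c cs ih =>
      intro hcs m hm
      unfold pvRunMax
      rw [List.foldl_cons, List.foldl_cons]
      have hc : c ∈ full := hcs c (List.mem_cons_self ..)
      rw [hag c hc, hag m hm]
      have htail : ∀ x ∈ cs, x ∈ full := fun x hx => hcs x (List.mem_cons_of_mem _ hx)
      by_cases h : key m < key c
      · simp only [gt_iff_lt, h, if_pos]
        exact ih htail c hc
      · simp only [gt_iff_lt, h, if_neg]
        exact ih htail m hm

-- ===== VERDICT (by name: the statement is the Claim_ definition above) =====
theorem build_id_index_spec : Claim_equal_build_id_index := by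
  intro entries target_ids _
  unfold Spec_build_id_index
  by_cases hempty : entries = [] ∨ target_ids = []
  · simp [build_id_index, build_id_index_alt, hempty]
  · simp only [build_id_index, build_id_index_alt, if_neg hempty]
    set target_norm : PySem.Set String := PySem.Set.ofList (target_ids.map pvNorm) with htn
    set cand0 : List String := ((entries.headD []).map (fun p => p.1)).filter (fun k => PySem.Str.isIn "id" (PySem.Str.lower k)) with hc0
    set candidates : List String := if cand0 = [] then ["id"] else cand0 with hcand
    set cset : PySem.Set String := PySem.Set.ofList candidates with hcset
    have hne : candidates ≠ [] := by
      rw [hcand]; split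
      · simp
      · assumption
    obtain ⟨c, rest, hcr⟩ := List.exists_cons_of_ne_nil hne
    set keyA : String → Int := fun k =>
        PySem.Set.len (PySem.Set.inter
          (entries.foldl (fun s e =>
            match pvGetT e k with
            | some v => s.add (pvNorm v)
            | none => s) PySem.Set.empty)
          target_norm) with hkeyA
    set rev : PySem.Dict String (PySem.Set String) :=
      entries.foldl (fun r e =>
        (pvItems e).foldl (fun r kv =>
          if cset.contains kv.1 && !(kv.2 == "") then
            r.modify (pvNorm kv.2) PySem.Set.empty (fun s => s.add kv.1)
          else r) r) PySem.Dict.empty with hrev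
    set score : PySem.Dict String Int :=
      target_norm.foldl (fun sc t =>
        (rev.getD t PySem.Set.empty).foldl (fun sc k => sc.insert k (sc.getD k 0 + 1)) sc) PySem.Dict.empty with hscore
    have hrevnd : ∀ t, (rev.getD t PySem.Set.empty).Nodup := by
      rw [hrev]
      exact pvRev_nodup cset entries PySem.Dict.empty (fun t => by simp [PySem.Dict.getD_empty, PySem.Set.empty])
    -- score agrees with A's key on every candidate
    have hag : ∀ k ∈ candidates, score.getD k 0 = keyA k := by
      intro k hk
      have hck : cset.contains k = true := by
        rw [hcset, PySem.Set.contains_iff]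
        exact (PySem.Set.mem_ofList candidates k).mpr hk
      rw [hscore, pvScore_getD rev target_norm PySem.Dict.empty k hrevnd]
      rw [PySem.Dict.getD_empty]
      have hcongr : target_norm.countP (fun t => decide (k ∈ rev.getD t PySem.Set.empty))
          = target_norm.countP (fun t => decide (t ∈ pvSeenA entries k PySem.Set.empty)) := by
        apply List.countP_congr
        intro t _
        simp only [decide_eq_true_eq]
        rw [hrev]
        exact pvRev_mem_iff_seenA cset entries t k hck
      rw [hcongr]
      have hkv : keyA k = ((target_norm.countP (fun t => decide (t ∈ pvSeenA entries k PySem.Set.empty))) : Int) := by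
        rw [hkeyA]
        show PySem.Set.len (PySem.Set.inter (pvSeenA entries k PySem.Set.empty) target_norm) = _
        exact pvKeyA_eq_countP _ _ (pvSeenA_nodup entries k) (PySem.Set.nodup_ofList _)
      omega
    -- B's selection fold computes the same best key as A's max?
    have hbestA : PySem.List.max? candidates keyA = some (pvRunMax keyA rest c) := by
      rw [hcr]; exact pvMax?_eq_runMax keyA rest c
    have hbestB : candidates.tail.foldl (fun b k => if score.getD k 0 > score.getD b 0 then k else b)
        (candidates.headD "id") = pvRunMax keyA rest c := by
      rw [hcr, List.tail_cons, List.headD_cons]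
      exact pvBSel_eq_runMax (fun k => score.getD k 0) keyA candidates hag rest
        (fun x hx => hcr ▸ List.mem_cons_of_mem _ hx) c (hcr ▸ List.mem_cons_self ..)
    rw [hbestA, hbestB]
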